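-- pv_equiv track=rewrite | github.com/MathiasRetteras/Pr-veeksamen-Mathias1 | Spesifikasjon av python scripts/Spesifikasjon av python scripts.py | finn_duplikater
-- ===== SOURCE A (Python) =====
-- def finn_duplikater(deltakerliste):
--     frekvens_dict = {}
--     for navn in deltakerliste:
--         if navn in frekvens_dict:
--             frekvens_dict[navn] += 1
--         else:
--             frekvens_dict[navn] = 1
--     return [(navn, frekvens) for navn, frekvens in frekvens_dict.items() if frekvens > 1]
-- ===== SOURCE B (Python) =====
-- def finn_duplikater(deltakerliste):
--     sett = set()
--     resultat = []
--     for navn in deltakerliste: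
--         if navn not in sett:
--             sett.add(navn)
--             antall = deltakerliste.count(navn)
--             if antall > 1:
--                 resultat.append((navn, antall))
--     return resultat
-- ===== Notes on version B (the rewrite author's own statement) =====
-- stated objective: alternative
-- what changed: Replaces the frequency dictionary with a seen-set pass that computes each distinct name's multiplicity by rescanning the list with list.count, emitting (name, count) at first appearance.
import Mathlib
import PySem

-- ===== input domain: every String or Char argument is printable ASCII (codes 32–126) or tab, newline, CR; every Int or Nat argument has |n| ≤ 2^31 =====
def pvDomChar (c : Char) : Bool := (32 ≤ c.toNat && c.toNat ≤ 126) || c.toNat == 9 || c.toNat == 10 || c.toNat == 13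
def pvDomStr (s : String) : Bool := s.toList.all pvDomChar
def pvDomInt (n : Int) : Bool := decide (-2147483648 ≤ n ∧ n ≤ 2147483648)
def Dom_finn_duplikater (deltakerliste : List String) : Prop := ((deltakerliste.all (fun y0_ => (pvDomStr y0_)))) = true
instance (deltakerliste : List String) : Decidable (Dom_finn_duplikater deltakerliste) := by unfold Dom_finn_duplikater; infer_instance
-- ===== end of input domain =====

-- B replaces A's frequency dictionary by a seen-set pass that rescans the list with
-- list.count at each name's first appearance (alternative decomposition, not faster).


-- ===== PORT A =====
-- build the frequency dict (navn in dict ? +=1 : =1), then keep items with frekvens > 1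
def finn_duplikater (deltakerliste : List String) : List (String × Int) :=
  (deltakerliste.foldl
    (fun d navn =>
      if d.contains navn then d.insert navn (d.getD navn 0 + 1)
      else d.insert navn 1)
    PySem.Dict.empty).items.filter (fun p => 1 < p.2)

-- ===== PORT B =====
-- loop with a seen set; at a first occurrence count the whole list and emit if > 1
def finnDupGo (full : List String) (rest : List String) (sett : PySem.Set String)
    (resultat : List (String × Int)) : List (String × Int) :=
  match rest with
  | [] => resultat
  | navn :: more =>
    if sett.contains navn then finnDupGo full more sett resultat
    else
      let antall : Int := (PySem.List.count full navn : Int)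
      if 1 < antall then finnDupGo full more (sett.add navn) (resultat ++ [(navn, antall)])
      else finnDupGo full more (sett.add navn) resultat

def finn_duplikater_alt (deltakerliste : List String) : List (String × Int) :=
  finnDupGo deltakerliste deltakerliste PySem.Set.empty []

-- ===== PRECONDITION & SPEC =====
def Spec_finn_duplikater (deltakerliste : List String) (out : List (String × Int)) : Prop := out = finn_duplikater_alt deltakerliste
instance (deltakerliste : List String) (out : List (String × Int)) : Decidable (Spec_finn_duplikater deltakerliste out) := by unfold Spec_finn_duplikater; infer_instance

-- ===== CLAIM (what is proved, stated in full; the proofs are below) =====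
def Claim_equal_finn_duplikater : Prop := ∀ (deltakerliste : List String), Dom_finn_duplikater deltakerliste → Spec_finn_duplikater deltakerliste (finn_duplikater deltakerliste)

-- ===== LEMMAS AND PROOFS =====

-- the first occurrences of l not already in seen, in order (proof-side helper)
def newElems (seen : PySem.Set String) : List String → List String
  | [] => []
  | n :: rest => if seen.contains n then newElems seen rest else n :: newElems (seen.add n) rest

lemma update_eq_append_newElems (l : List String) :
    ∀ seen : PySem.Set String, seen.update l = seen ++ newElems seen l := by
  induction l with
  | nil => intro seen; simp [newElems, PySem.Set.update_nil]
  | cons n rest ih =>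
    intro seen
    rw [PySem.Set.update_cons, ih]
    by_cases h : n ∈ seen
    · simp [newElems, h]
    · simp [newElems, h]

lemma finnDupGo_eq (full : List String) (l : List String) :
    ∀ (seen : PySem.Set String) (acc : List (String × Int)),
      finnDupGo full l seen acc =
        acc ++ ((newElems seen l).map
          (fun n => (n, (PySem.List.count full n : Int)))).filter (fun p => 1 < p.2) := by
  induction l with
  | nil => intro seen acc; simp [finnDupGo, newElems]
  | cons n rest ih =>
    intro seen acc
    by_cases h : n ∈ seen
    · simp [finnDupGo, h, newElems, ih]
    · by_cases hc : 1 < List.count n full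
      · simp [finnDupGo, h, newElems, ih, hc, PySem.List.count_eq]
      · simp [finnDupGo, h, newElems, ih, hc, PySem.List.count_eq]

lemma stepA_eq (d : PySem.Dict String Int) (n : String) :
    (if d.contains n then d.insert n (d.getD n 0 + 1) else d.insert n 1) =
      d.insert n (d.getD n 0 + 1) := by
  by_cases h : d.contains n
  · simp [h]
  · simp only [Bool.not_eq_true] at h
    simp [h, PySem.Dict.getD_of_not_contains]

-- ===== VERDICT (by name: the statement is the Claim_ definition above) =====
theorem finn_duplikater_spec : Claim_equal_finn_duplikater := by
  intro xs _
  unfold Spec_finn_duplikater finn_duplikater finn_duplikater_alt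
  have hf : (fun (d : PySem.Dict String Int) navn =>
      if d.contains navn then d.insert navn (d.getD navn 0 + 1) else d.insert navn 1) =
      (fun d navn => d.insert navn (d.getD navn 0 + 1)) :=
    funext fun d => funext fun n => stepA_eq d n
  rw [finnDupGo_eq, hf, PySem.Dict.foldl_insert_getD_add_one_eq_counter,
    PySem.Dict.items_counter]
  have hof : PySem.Set.ofList xs = newElems PySem.Set.empty xs := by
    have := update_eq_append_newElems xs PySem.Set.empty
    simpa [PySem.Set.update_nil_left] using this
  simp [hof, PySem.List.count_eq]
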